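-- pv_equiv track=rewrite | github.com/Haotian9850/automated-ADMIT | LatexGenerator.py | prettyPrintCompound
-- ===== SOURCE A (Python) =====
-- def prettyPrintCompound(compound):
--     """
--     Linear complexity, most efficient!
--     Args:
--         compound: ugly compound name. Str
--     Returns:
--         a latex-compatible pretty print of the input name
--     """
--     # unable to identify
--     if compound[0] == 'U':
--         return "null"
--
--     compoundList = []
--     splitIndice = []
--     result = []
--     for i in range(0, len(compound) - 1):
--         if (compound[i].isdigit() and not compound[i + 1].isdigit()):
--             splitIndice.append(i + 1)
--         elif (not compound[i].isdigit() and compound[i + 1].isdigit()):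
--             splitIndice.append(i + 1)
--
--     splitIndice.insert(0, 0)
--     splitIndice.insert(len(splitIndice), len(compound))
--
--     for i in range(0, len(splitIndice) - 1):
--         compoundList.append(compound[splitIndice[i] : splitIndice[i + 1]])
--     for element in compoundList:
--         newElement = element
--         if element.isdigit():
--             newElement = "_{" + element + "}"
--         result.append(newElement)
--     return "".join(result)
-- ===== SOURCE B (Python) =====
-- def prettyPrintCompound(compound):
--     # unable to identify
--     if compound[0] == 'U':
--         return "null"
--     # single pass: accumulate maximal runs of equal digit-ness, formatting each
--     # finished run on the fly
--     out = []
--     run = compound[0]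
--     for ch in compound[1:]:
--         if ch.isdigit() == run[0].isdigit():
--             run += ch
--         else:
--             out.append("_{" + run + "}" if run[0].isdigit() else run)
--             run = ch
--     out.append("_{" + run + "}" if run[0].isdigit() else run)
--     return "".join(out)
-- ===== Notes on version B (the rewrite author's own statement) =====
-- stated objective: simpler
-- what changed: Replaces A's three passes (collect digit/non-digit boundary indices, slice the string at those indices, then format each slice) by a single left-to-right pass that accumulates the current run of equal digit-ness and formats each run as it is finished.
-- outside the precondition, e.g. on prettyPrintCompound(''): A raises IndexError, B raises IndexError
import Mathlib
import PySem

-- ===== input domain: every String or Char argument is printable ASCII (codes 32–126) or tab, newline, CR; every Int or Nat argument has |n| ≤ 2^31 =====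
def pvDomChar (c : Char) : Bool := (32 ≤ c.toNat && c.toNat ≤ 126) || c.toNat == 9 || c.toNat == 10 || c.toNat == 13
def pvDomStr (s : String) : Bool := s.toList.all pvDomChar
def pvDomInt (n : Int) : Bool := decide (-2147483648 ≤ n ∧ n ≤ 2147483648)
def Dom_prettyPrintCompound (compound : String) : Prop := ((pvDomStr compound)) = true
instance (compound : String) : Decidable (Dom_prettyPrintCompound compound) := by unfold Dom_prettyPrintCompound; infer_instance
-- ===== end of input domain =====

-- B replaces A's boundary-index list + slicing passes by one pass that accumulates
-- maximal runs of equal digit-ness and formats each run as it is finished (simpler).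

-- ===== PORT A =====
-- first loop: 'for i in range(0, len(compound)-1): … splitIndice.append(i+1)'
def pvA_bnd (cs : List Char) : List Int :=
  (PySem.List.pyRange 0 ((cs.length : Int) - 1)).foldl (fun acc i =>
    if PySem.Chars.isdigit (PySem.List.pyGetD cs i ' ')
        && !PySem.Chars.isdigit (PySem.List.pyGetD cs (i + 1) ' ')
    then acc ++ [i + 1]
    else if !PySem.Chars.isdigit (PySem.List.pyGetD cs i ' ')
        && PySem.Chars.isdigit (PySem.List.pyGetD cs (i + 1) ' ')
    then acc ++ [i + 1]
    else acc) []

-- 'splitIndice.insert(0, 0); splitIndice.insert(len(splitIndice), len(compound))'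
def pvA_indices (cs : List Char) : List Int := (0 :: pvA_bnd cs) ++ [(cs.length : Int)]

-- second loop: 'compoundList.append(compound[splitIndice[i] : splitIndice[i+1]])'
def pvA_segs (cs : List Char) : List (List Char) :=
  (PySem.List.pyRange 0 (((pvA_indices cs).length : Int) - 1)).foldl (fun acc i =>
    acc ++ [PySem.List.slice cs (some (PySem.List.pyGetD (pvA_indices cs) i 0))
                                (some (PySem.List.pyGetD (pvA_indices cs) (i + 1) 0))]) []

def prettyPrintCompound (compound : String) : String :=
  let cs := compound.toList
  match PySem.List.pyGet? cs 0 with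
  | none => ""          -- compound[0] raises IndexError on "": excluded by Pre_
  | some c0 =>
    if c0 = 'U' then "null"
    else
      -- third loop: format each element, then '"".join(result)'
      let result := (pvA_segs cs).foldl (fun acc e =>
        acc ++ [if PySem.Chars.strIsdigit e then ('_' :: '{' :: e) ++ ['}'] else e]) []
      String.ofList (PySem.Chars.join [] result)

-- ===== PORT B =====
-- '"_{" + run + "}" if run[0].isdigit() else run'
def pvFmt (run : List Char) : List Char :=
  if PySem.Chars.isdigit (run.headD ' ') then ('_' :: '{' :: run) ++ ['}'] else run

-- B's single loop over compound[1:], state = (out, run)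
def pvBLoop : List Char → List (List Char) → List Char → List (List Char)
  | [], out, run => out ++ [pvFmt run]
  | c :: rest, out, run =>
    if PySem.Chars.isdigit c == PySem.Chars.isdigit (run.headD ' ')
    then pvBLoop rest out (run ++ [c])
    else pvBLoop rest (out ++ [pvFmt run]) [c]

def prettyPrintCompound_alt (compound : String) : String :=
  match compound.toList with
  | [] => ""            -- compound[0] raises IndexError on "": excluded by Pre_
  | c :: rest =>
    if c = 'U' then "null"
    else String.ofList (PySem.Chars.join [] (pvBLoop rest [] [c]))

-- ===== PRECONDITION & SPEC =====
-- Pre_ excludes only the empty string, on which both A and B raise IndexError at compound[0].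
def Pre_prettyPrintCompound (compound : String) : Prop := compound.toList ≠ []
instance (compound : String) : Decidable (Pre_prettyPrintCompound compound) := by
  unfold Pre_prettyPrintCompound; infer_instance
def pvWitness_prettyPrintCompound : String := "C6H12O6"

def Spec_prettyPrintCompound (compound : String) (out : String) : Prop :=
  out = prettyPrintCompound_alt compound
instance (compound : String) (out : String) : Decidable (Spec_prettyPrintCompound compound out) := by
  unfold Spec_prettyPrintCompound; infer_instance

-- ===== CLAIM (what is proved, stated in full; the proofs are below) =====
def Claim_equal_prettyPrintCompound : Prop := ∀ (compound : String),
  Dom_prettyPrintCompound compound → Pre_prettyPrintCompound compound →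
  Spec_prettyPrintCompound compound (prettyPrintCompound compound)

-- ===== LEMMAS AND PROOFS =====

-- Nat-level form of A's boundary list
def pvBnd (cs : List Char) : List Nat :=
  (List.range (cs.length - 1)).foldl (fun acc i =>
    if PySem.Chars.isdigit (cs.getD i ' ') == PySem.Chars.isdigit (cs.getD (i + 1) ' ')
    then acc else acc ++ [i + 1]) []

-- canonical runs, built one character at a time (snoc machine)
def pvSnocRun (rs : List (List Char)) (c : Char) : List (List Char) :=
  match rs.getLast? with
  | none => [[c]]
  | some r => if PySem.Chars.isdigit c == PySem.Chars.isdigit (r.headD ' ')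
              then rs.dropLast ++ [r ++ [c]] else rs ++ [[c]]

def pvRuns (cs : List Char) : List (List Char) := cs.foldl pvSnocRun []

-- raw (unformatted) form of B's loop
def pvRaw : List Char → List Char → List (List Char)
  | [], run => [run]
  | c :: rest, run =>
    if PySem.Chars.isdigit c == PySem.Chars.isdigit (run.headD ' ')
    then pvRaw rest (run ++ [c])
    else run :: pvRaw rest [c]

-- A's segments, Nat-level
def pvSegs (cs : List Char) : List (List Char) :=
  (((0 :: pvBnd cs) ++ [cs.length]).zip (((0 :: pvBnd cs) ++ [cs.length]).tail)).map
    (fun p => (cs.drop p.1).take (p.2 - p.1))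

theorem pvBLoop_eq_raw (rest : List Char) :
    ∀ out run, pvBLoop rest out run = out ++ (pvRaw rest run).map pvFmt := by
  induction rest with
  | nil => intro out run; simp [pvBLoop, pvRaw]
  | cons c rest ih =>
    intro out run
    cases h : (PySem.Chars.isdigit c == PySem.Chars.isdigit (run.headD ' '))
    · rw [show pvBLoop (c :: rest) out run = pvBLoop rest (out ++ [pvFmt run]) [c] by
          simp only [pvBLoop, h, Bool.false_eq_true, if_false],
        show pvRaw (c :: rest) run = run :: pvRaw rest [c] by
          simp only [pvRaw, h, Bool.false_eq_true, if_false],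
        ih]
      simp
    · rw [show pvBLoop (c :: rest) out run = pvBLoop rest out (run ++ [c]) by
          simp only [pvBLoop, h, if_true],
        show pvRaw (c :: rest) run = pvRaw rest (run ++ [c]) by
          simp only [pvRaw, h, if_true],
        ih]

theorem pvRaw_foldl (rest : List Char) :
    ∀ acc run, rest.foldl pvSnocRun (acc ++ [run]) = acc ++ pvRaw rest run := by
  induction rest with
  | nil => intro acc run; simp [pvRaw]
  | cons c rest ih =>
    intro acc run
    have hstep : pvSnocRun (acc ++ [run]) c =
        if PySem.Chars.isdigit c == PySem.Chars.isdigit (run.headD ' ')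
        then acc ++ [run ++ [c]] else (acc ++ [run]) ++ [[c]] := by
      simp [pvSnocRun]
    cases h : (PySem.Chars.isdigit c == PySem.Chars.isdigit (run.headD ' '))
    · rw [List.foldl_cons, hstep, if_neg (by rw [h]; exact Bool.false_ne_true), ih,
        show pvRaw (c :: rest) run = run :: pvRaw rest [c] by
          simp only [pvRaw, h, Bool.false_eq_true, if_false]]
      simp
    · rw [List.foldl_cons, hstep, if_pos h, ih,
        show pvRaw (c :: rest) run = pvRaw rest (run ++ [c]) by
          simp only [pvRaw, h, if_true]]

theorem pvRuns_eq_raw (c0 : Char) (rest : List Char) :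
    pvRuns (c0 :: rest) = pvRaw rest [c0] := by
  have h0 : pvSnocRun [] c0 = [] ++ [[c0]] := by simp [pvSnocRun]
  simpa [pvRuns, h0] using pvRaw_foldl rest [] [c0]

-- fold of A's two-branch boundary test over Nat indices, with an Int accumulator,
-- equals the cast of pvBnd's fold
theorem pvA_bnd_gen (d : Nat → Bool) (l : List Nat) :
    ∀ acc : List Nat,
      l.foldl (fun a i =>
          if d i && !d (i + 1) then a ++ [((i + 1 : Nat) : Int)]
          else if !d i && d (i + 1) then a ++ [((i + 1 : Nat) : Int)]
          else a) (acc.map (Nat.cast : Nat → Int))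
      = (l.foldl (fun a i => if d i == d (i + 1) then a else a ++ [i + 1]) acc).map (Nat.cast : Nat → Int) := by
  induction l with
  | nil => intro acc; simp
  | cons i l ih =>
    intro acc
    have hpush : acc.map (Nat.cast : Nat → Int) ++ [((i + 1 : Nat) : Int)]
        = (acc ++ [i + 1]).map (Nat.cast : Nat → Int) := by simp
    cases h1 : d i <;> cases h2 : d (i + 1) <;>
      simp only [List.foldl_cons, h1, h2, Bool.not_true, Bool.not_false, Bool.and_true,
        Bool.and_false, Bool.true_and, Bool.false_and, Bool.true_beq, Bool.false_beq,
        beq_self_eq_true, if_true, Bool.false_eq_true, if_false] <;>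
      first
        | exact ih acc
        | (rw [hpush]; exact ih (acc ++ [i + 1]))

theorem pvA_bnd_eq (cs : List Char) :
    pvA_bnd cs = (pvBnd cs).map (Nat.cast : Nat → Int) := by
  rcases List.eq_nil_or_concat cs with rfl | ⟨ys, y, rfl⟩
  · decide
  · simp only [List.concat_eq_append]
    have hlen1 : (ys ++ [y]).length = ys.length + 1 := by simp
    have hlen : ((ys ++ [y]).length : Int) - 1 = (((ys ++ [y]).length - 1 : Nat) : Int) := by
      omega
    unfold pvA_bnd pvBnd
    rw [hlen, PySem.List.pyRange_zero_natCast, List.foldl_map]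
    have hbody : ∀ (a : List Int), ∀ k ∈ List.range ((ys ++ [y]).length - 1),
        (fun (a : List Int) (k : Nat) =>
          if PySem.Chars.isdigit (PySem.List.pyGetD (ys ++ [y]) ((k : Int)) ' ')
              && !PySem.Chars.isdigit (PySem.List.pyGetD (ys ++ [y]) ((k : Int) + 1) ' ')
          then a ++ [(k : Int) + 1]
          else if !PySem.Chars.isdigit (PySem.List.pyGetD (ys ++ [y]) ((k : Int)) ' ')
              && PySem.Chars.isdigit (PySem.List.pyGetD (ys ++ [y]) ((k : Int) + 1) ' ')
          then a ++ [(k : Int) + 1]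
          else a) a k
        = (fun (a : List Int) (k : Nat) =>
          if PySem.Chars.isdigit ((ys ++ [y]).getD k ' ')
              && !PySem.Chars.isdigit ((ys ++ [y]).getD (k + 1) ' ')
          then a ++ [((k + 1 : Nat) : Int)]
          else if !PySem.Chars.isdigit ((ys ++ [y]).getD k ' ')
              && PySem.Chars.isdigit ((ys ++ [y]).getD (k + 1) ' ')
          then a ++ [((k + 1 : Nat) : Int)]
          else a) a k := by
      intro a k _
      simp only [← Nat.cast_add_one, PySem.List.pyGetD_natCast]
    rw [PySem.List.foldl_congr_mem _ _ _ _ hbody]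
    simpa using pvA_bnd_gen (fun k => PySem.Chars.isdigit ((ys ++ [y]).getD k ' '))
      (List.range ((ys ++ [y]).length - 1)) []

theorem range_map_pairs {α : Type} (g : Nat → Nat → α) :
    ∀ l : List Nat,
      (List.range (l.length - 1)).map (fun i => g (l.getD i 0) (l.getD (i + 1) 0))
        = (l.zip l.tail).map (fun p => g p.1 p.2) := by
  intro l
  induction l with
  | nil => rfl
  | cons a l ih =>
    cases l with
    | nil => rfl
    | cons b t =>
      have hlen : (a :: b :: t).length - 1 = t.length + 1 := by simp
      rw [hlen, List.range_succ_eq_map]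
      simp only [List.map_cons, List.map_map]
      have hlen2 : (b :: t).length - 1 = t.length := by simp
      rw [show (a :: b :: t).zip (a :: b :: t).tail
            = (a, b) :: ((b :: t).zip (b :: t).tail) by simp]
      simp only [List.map_cons]
      congr 1

theorem pvA_segs_eq (cs : List Char) : pvA_segs cs = pvSegs cs := by
  have hidx : pvA_indices cs
      = ((0 :: pvBnd cs) ++ [cs.length]).map (Nat.cast : Nat → Int) := by
    unfold pvA_indices
    rw [pvA_bnd_eq]
    simp
  set idxN := (0 :: pvBnd cs) ++ [cs.length] with hN
  have hlenN : idxN.length = (pvBnd cs).length + 2 := by simp [hN]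
  have hlen : (((pvA_indices cs).length : Int) - 1) = ((idxN.length - 1 : Nat) : Int) := by
    rw [hidx]; simp only [List.length_map, hlenN]; omega
  unfold pvA_segs pvSegs
  rw [hlen, PySem.List.pyRange_zero_natCast, List.foldl_map,
    PySem.List.foldl_append_singleton_eq_map (fun k : Nat =>
      PySem.List.slice cs (some (PySem.List.pyGetD (pvA_indices cs) ((k : Nat) : Int) 0))
        (some (PySem.List.pyGetD (pvA_indices cs) (((k : Nat) : Int) + 1) 0)))]
  rw [List.nil_append]
  rw [← range_map_pairs (fun a b => (cs.drop a).take (b - a)) idxN]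
  apply List.map_congr_left
  intro k _
  have hget : ∀ j : Nat, PySem.List.pyGetD (pvA_indices cs) ((j : Nat) : Int) 0
      = ((idxN.getD j 0 : Nat) : Int) := by
    intro j
    rw [hidx, PySem.List.pyGetD_natCast, show (0 : Int) = ((0 : Nat) : Int) by simp,
      List.getD_map]
  rw [show (((k : Nat) : Int) + 1) = (((k + 1 : Nat)) : Int) by push_cast; ring,
    hget k, hget (k + 1), PySem.List.slice_natCast]

theorem pvGetD_last (cs : List Char) (d : Char) :
    cs.getD (cs.length - 1) d = cs.getLastD d := by
  rw [List.getD_eq_getElem?_getD, List.getLastD_eq_getLast?, List.getLast?_eq_getElem?]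

theorem pvGetLastD_mem (l : List Nat) (d : Nat) (h : l ≠ []) : l.getLastD d ∈ l := by
  have h2 := List.getLast_mem h
  rwa [List.getLastD_eq_getLast?, List.getLast?_eq_some_getLast h]

theorem pvBnd_snoc (cs : List Char) (c : Char) (h : cs ≠ []) :
    pvBnd (cs ++ [c]) =
      pvBnd cs ++ (if PySem.Chars.isdigit (cs.getLastD ' ') == PySem.Chars.isdigit c
                   then [] else [cs.length]) := by
  obtain ⟨m, hm⟩ : ∃ m, cs.length = m + 1 := by
    cases cs with | nil => simp at h | cons a t => exact ⟨t.length, by simp⟩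
  have hlen : (cs ++ [c]).length - 1 = m + 1 := by simp [hm]
  unfold pvBnd
  rw [hlen, List.range_succ, List.foldl_append]
  have hinner : ∀ (a : List Nat), ∀ i ∈ List.range m,
      (fun (a : List Nat) (i : Nat) =>
        if PySem.Chars.isdigit ((cs ++ [c]).getD i ' ')
            == PySem.Chars.isdigit ((cs ++ [c]).getD (i + 1) ' ')
        then a else a ++ [i + 1]) a i
      = (fun (a : List Nat) (i : Nat) =>
        if PySem.Chars.isdigit (cs.getD i ' ') == PySem.Chars.isdigit (cs.getD (i + 1) ' ')
        then a else a ++ [i + 1]) a i := by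
    intro a i hi
    have hi' : i < m := List.mem_range.mp hi
    have e1 : (cs ++ [c]).getD i ' ' = cs.getD i ' ' :=
      List.getD_append _ _ _ _ (by omega)
    have e2 : (cs ++ [c]).getD (i + 1) ' ' = cs.getD (i + 1) ' ' :=
      List.getD_append _ _ _ _ (by omega)
    simp only [e1, e2]
  rw [PySem.List.foldl_congr_mem _ _ _ _ hinner]
  have hcs : cs.length - 1 = m := by omega
  rw [hcs]
  have hg1 : (cs ++ [c]).getD m ' ' = cs.getLastD ' ' := by
    rw [List.getD_append _ _ _ _ (by omega), ← pvGetD_last cs ' ', hcs]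
  have hg2 : (cs ++ [c]).getD (m + 1) ' ' = c := by
    rw [List.getD_append_right _ _ _ _ (by omega)]
    simp [hm]
  simp only [List.foldl_cons, List.foldl_nil, hg1, hg2]
  cases hb : (PySem.Chars.isdigit (cs.getLastD ' ') == PySem.Chars.isdigit c) <;>
    simp [hb, hm]

theorem pvBnd_mem_gen (p : Nat → Bool) :
    ∀ (l : List Nat) (acc : List Nat),
      ∀ b ∈ l.foldl (fun a i => if p i then a else a ++ [i + 1]) acc,
        b ∈ acc ∨ ∃ i ∈ l, b = i + 1 := by
  intro l
  induction l with
  | nil => intro acc b hb; exact Or.inl hb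
  | cons i l ih =>
    intro acc b hb
    rw [List.foldl_cons] at hb
    rcases ih _ b hb with hmem | ⟨j, hj, rfl⟩
    · by_cases hp : p i
      · rw [if_pos hp] at hmem; exact Or.inl hmem
      · rw [if_neg hp] at hmem
        rcases List.mem_append.mp hmem with h1 | h1
        · exact Or.inl h1
        · exact Or.inr ⟨i, by simp, by simpa using h1⟩
    · exact Or.inr ⟨j, by simp [hj], rfl⟩

theorem pvBnd_lt (cs : List Char) : ∀ b ∈ pvBnd cs, b < cs.length := by
  intro b hb
  rcases pvBnd_mem_gen _ _ [] b hb with h | ⟨i, hi, rfl⟩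
  · simp at h
  · have := List.mem_range.mp hi
    omega

theorem pvRuns_concat (ys : List Char) (y : Char) :
    pvRuns (ys ++ [y]) = pvSnocRun (pvRuns ys) y := by
  simp [pvRuns, List.foldl_append]

theorem pvSnocRun_concat (rs : List (List Char)) (r : List Char) (c : Char) :
    pvSnocRun (rs ++ [r]) c =
      if PySem.Chars.isdigit c == PySem.Chars.isdigit (r.headD ' ')
      then rs ++ [r ++ [c]] else (rs ++ [r]) ++ [[c]] := by
  simp [pvSnocRun]

-- joint invariant of the run machine: runs are nonempty and homogeneous, and the
-- last run's digit-ness is that of the last character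
theorem pvRuns_inv (cs : List Char) (h : cs ≠ []) :
    ∃ rs r, pvRuns cs = rs ++ [r] ∧
      (∀ q ∈ rs ++ [r], q ≠ [] ∧
        ∀ x ∈ q, PySem.Chars.isdigit x = PySem.Chars.isdigit (q.headD ' ')) ∧
      (∀ x ∈ r, PySem.Chars.isdigit x = PySem.Chars.isdigit (cs.getLastD ' ')) := by
  induction cs using List.reverseRecOn with
  | nil => simp at h
  | append_singleton ys y ih =>
    rcases eq_or_ne ys [] with rfl | hys
    · refine ⟨[], [y], by simp [pvRuns, pvSnocRun], ?_, ?_⟩ <;> simp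
    · obtain ⟨rs, r, hruns, hhom, hlast⟩ := ih hys
      have hrne : r ≠ [] := (hhom r (by simp)).1
      have hhead : r.headD ' ' ∈ r := by
        cases r with | nil => simp at hrne | cons a t => simp
      have hheadlast : PySem.Chars.isdigit (r.headD ' ')
          = PySem.Chars.isdigit (ys.getLastD ' ') := hlast _ hhead
      rw [pvRuns_concat, hruns, pvSnocRun_concat]
      by_cases hy : PySem.Chars.isdigit y = PySem.Chars.isdigit (r.headD ' ')
      · rw [if_pos (beq_iff_eq.mpr hy)]
        refine ⟨rs, r ++ [y], rfl, ?_, ?_⟩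
        · intro q hq
          rcases List.mem_append.mp hq with hq | hq
          · exact hhom q (by simp [hq])
          · simp at hq; subst hq
            have hh : (r ++ [y]).headD ' ' = r.headD ' ' := by
              cases r with | nil => simp at hrne | cons a t => simp
            refine ⟨by simp, ?_⟩
            intro x hx
            rw [hh]
            rcases List.mem_append.mp hx with hx | hx
            · exact ((hhom r (by simp)).2) x hx
            · simp at hx; subst hx; exact hy
        · intro x hx
          rw [List.getLastD_concat]
          rcases List.mem_append.mp hx with hx | hx
          · rw [hlast x hx, ← hheadlast, ← hy]
          · simp at hx; subst hx; rfl
      · rw [if_neg (by rw [beq_iff_eq]; exact hy)]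
        refine ⟨rs ++ [r], [y], rfl, ?_, ?_⟩
        · intro q hq
          rcases List.mem_append.mp hq with hq | hq
          · exact hhom q hq
          · simp at hq; subst hq
            exact ⟨by simp, by simp⟩
        · intro x hx
          simp at hx; subst hx
          simp [List.getLastD_concat]

theorem pvRuns_last (cs : List Char) (h : cs ≠ []) :
    ∃ rs r, pvRuns cs = rs ++ [r] ∧ r ≠ [] ∧
      ∀ x ∈ r, PySem.Chars.isdigit x = PySem.Chars.isdigit (cs.getLastD ' ') := by
  obtain ⟨rs, r, h1, h2, h3⟩ := pvRuns_inv cs h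
  exact ⟨rs, r, h1, (h2 r (by simp)).1, h3⟩

theorem pvRuns_homog (cs : List Char) :
    ∀ r ∈ pvRuns cs, r ≠ [] ∧
      ∀ x ∈ r, PySem.Chars.isdigit x = PySem.Chars.isdigit (r.headD ' ') := by
  intro r hr
  rcases eq_or_ne cs [] with rfl | h
  · simp [pvRuns] at hr
  · obtain ⟨rs, r', h1, h2, _⟩ := pvRuns_inv cs h
    exact h2 r (h1 ▸ hr)

-- pairs of consecutive entries, after appending one entry
theorem pvZipTail_concat : ∀ (l : List Nat) (b : Nat), l ≠ [] →
    (l ++ [b]).zip ((l ++ [b]).tail) = l.zip l.tail ++ [(l.getLastD 0, b)] := by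
  intro l
  induction l with
  | nil => intro b hb; simp at hb
  | cons a l ih =>
    intro b _
    cases l with
    | nil => simp
    | cons c t =>
      have hih := ih b (by simp)
      simp only [List.cons_append, List.tail_cons, List.zip_cons_cons] at hih ⊢
      rw [hih]
      simp [List.getLastD_eq_getLast?]

-- a slice of the old string is unchanged by appending a character
theorem pvSlice_stable (ys : List Char) (y : Char) (a b : Nat)
    (ha : a ≤ ys.length) (hb : b ≤ ys.length) :
    ((ys ++ [y]).drop a).take (b - a) = (ys.drop a).take (b - a) := by
  rw [List.drop_append_of_le_length ha,
    List.take_append_of_le_length (by simp; omega)]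

theorem pvSegs_eq_runs (cs : List Char) (h : cs ≠ []) : pvSegs cs = pvRuns cs := by
  induction cs using List.reverseRecOn with
  | nil => simp at h
  | append_singleton ys y ih =>
    rcases eq_or_ne ys [] with rfl | hys
    · simp [pvSegs, pvBnd, pvRuns, pvSnocRun]
    · obtain ⟨rs, r, hruns, hrne, hrlast⟩ := pvRuns_last ys hys
      have hIH : pvSegs ys = rs ++ [r] := (ih hys).trans hruns
      have hhead : r.headD ' ' ∈ r := by
        cases r with | nil => simp at hrne | cons q t => simp
      have hheadlast : PySem.Chars.isdigit (r.headD ' ')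
          = PySem.Chars.isdigit (ys.getLastD ' ') := hrlast _ hhead
      have hblt : ∀ b ∈ pvBnd ys, b < ys.length := pvBnd_lt ys
      have hbase_le : ∀ a ∈ (0 :: pvBnd ys), a ≤ ys.length := by
        intro a ha
        rcases List.mem_cons.mp ha with rfl | ha
        · omega
        · exact le_of_lt (hblt a ha)
      have hbase : (0 :: pvBnd ys) ≠ [] := by simp
      have ha0 : (0 :: pvBnd ys).getLastD 0 ≤ ys.length :=
        hbase_le _ (pvGetLastD_mem _ _ hbase)
      have hlen' : (ys ++ [y]).length = ys.length + 1 := by simp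
      -- decompose pvSegs ys
      have hsegs_ys : pvSegs ys
          = ((0 :: pvBnd ys).zip (0 :: pvBnd ys).tail).map
              (fun p => (ys.drop p.1).take (p.2 - p.1))
            ++ [ys.drop ((0 :: pvBnd ys).getLastD 0)] := by
        unfold pvSegs
        rw [pvZipTail_concat _ _ hbase, List.map_append]
        congr 1
        simp only [List.map_cons, List.map_nil]
        rw [List.take_of_length_le (by simp)]
      have hsplit := List.concat_inj.mp
        (by simpa [List.concat_eq_append] using (hsegs_ys.symm.trans hIH))
      have hmap_eq : ((0 :: pvBnd ys).zip (0 :: pvBnd ys).tail).map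
          (fun p => (ys.drop p.1).take (p.2 - p.1)) = rs := hsplit.1
      have hr_eq : ys.drop ((0 :: pvBnd ys).getLastD 0) = r := hsplit.2
      rw [pvRuns_concat, hruns, pvSnocRun_concat]
      by_cases hb : PySem.Chars.isdigit (ys.getLastD ' ') = PySem.Chars.isdigit y
      · -- same digit-ness: boundaries unchanged, last segment/run extended by y
        have hbnd : pvBnd (ys ++ [y]) = pvBnd ys := by
          rw [pvBnd_snoc ys y hys, if_pos (beq_iff_eq.mpr hb)]; simp
        rw [if_pos (beq_iff_eq.mpr (by rw [hheadlast, hb]))]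
        unfold pvSegs
        rw [hbnd, hlen', pvZipTail_concat _ _ hbase, List.map_append]
        congr 1
        · rw [← hmap_eq]
          apply List.map_congr_left
          intro p hp
          have hp1 : p.1 ∈ (0 :: pvBnd ys) := (List.of_mem_zip hp).1
          have hp2 : p.2 ∈ (0 :: pvBnd ys) :=
            List.mem_of_mem_tail (List.of_mem_zip hp).2
          exact pvSlice_stable ys y p.1 p.2 (hbase_le _ hp1) (hbase_le _ hp2)
        · simp only [List.map_cons, List.map_nil]
          rw [List.drop_append_of_le_length ha0,
            List.take_of_length_le (by
              simp only [List.length_append, List.length_drop, List.length_cons,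
                List.length_nil]
              omega), hr_eq]
      · -- different digit-ness: one more boundary, new run [y]
        have hbnd : pvBnd (ys ++ [y]) = pvBnd ys ++ [ys.length] := by
          rw [pvBnd_snoc ys y hys, if_neg (by rw [beq_iff_eq]; exact hb)]
        rw [if_neg (by rw [beq_iff_eq, hheadlast]; exact fun hc => hb hc.symm)]
        unfold pvSegs
        rw [hbnd, hlen']
        have hcons : (0 :: (pvBnd ys ++ [ys.length])) = (0 :: pvBnd ys) ++ [ys.length] := by
          simp
        rw [hcons, pvZipTail_concat _ _ (by simp), List.map_append,
          pvZipTail_concat _ _ hbase, List.map_append, List.getLastD_concat]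
        congr 1
        congr 1
        · rw [← hmap_eq]
          apply List.map_congr_left
          intro p hp
          have hp1 : p.1 ∈ (0 :: pvBnd ys) := (List.of_mem_zip hp).1
          have hp2 : p.2 ∈ (0 :: pvBnd ys) :=
            List.mem_of_mem_tail (List.of_mem_zip hp).2
          exact pvSlice_stable ys y p.1 p.2 (hbase_le _ hp1) (hbase_le _ hp2)
        · simp only [List.map_cons, List.map_nil]
          rw [pvSlice_stable ys y _ _ ha0 (le_refl _),
            List.take_of_length_le (by simp), hr_eq]
        · simp only [List.map_cons, List.map_nil]
          rw [List.drop_left]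
          simp

-- ===== VERDICT (by name: the statement is the Claim_ definition above) =====
-- on a nonempty homogeneous run, A's whole-segment test agrees with B's head test
theorem pvFmt_agree (r : List Char) (hne : r ≠ [])
    (hhom : ∀ x ∈ r, PySem.Chars.isdigit x = PySem.Chars.isdigit (r.headD ' ')) :
    (if PySem.Chars.strIsdigit r then ('_' :: '{' :: r) ++ ['}'] else r) = pvFmt r := by
  have hhead : r.headD ' ' ∈ r := by
    cases r with | nil => simp at hne | cons a t => simp
  unfold pvFmt
  cases hd : PySem.Chars.isdigit (r.headD ' ')
  · have hall : r.all PySem.Chars.isdigit = false := by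
      rw [List.all_eq_false]
      exact ⟨_, hhead, by rw [hd]; simp⟩
    have hs : PySem.Chars.strIsdigit r = false := by
      unfold PySem.Chars.strIsdigit
      simp [hall]
    rw [hs]
  · have hall : r.all PySem.Chars.isdigit = true := by
      rw [List.all_eq_true]
      intro x hx
      rw [hhom x hx, hd]
    have hs : PySem.Chars.strIsdigit r = true := by
      unfold PySem.Chars.strIsdigit
      simp [hall, hne]
    rw [hs]

theorem prettyPrintCompound_spec : Claim_equal_prettyPrintCompound := by
  intro compound _ hpre
  unfold Pre_prettyPrintCompound at hpre
  unfold Spec_prettyPrintCompound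
  obtain ⟨c0, rest, hcs⟩ : ∃ c0 rest, compound.toList = c0 :: rest := by
    cases hc : compound.toList with
    | nil => exact absurd hc hpre
    | cons a t => exact ⟨a, t, rfl⟩
  simp only [prettyPrintCompound, prettyPrintCompound_alt, hcs,
    PySem.List.pyGet?_zero_cons]
  by_cases hU : c0 = 'U'
  · simp [hU]
  · rw [if_neg hU, if_neg hU]
    refine congrArg String.ofList (congrArg (PySem.Chars.join []) ?_)
    rw [PySem.List.foldl_append_singleton_eq_map
      (fun e => if PySem.Chars.strIsdigit e then ('_' :: '{' :: e) ++ ['}'] else e),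
      List.nil_append, pvBLoop_eq_raw, List.nil_append, ← pvRuns_eq_raw,
      pvA_segs_eq, pvSegs_eq_runs (c0 :: rest) (by simp)]
    apply List.map_congr_left
    intro r hr
    obtain ⟨hne, hhom⟩ := pvRuns_homog (c0 :: rest) r hr
    exact pvFmt_agree r hne hhom
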